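-- pv_equiv track=rewrite | github.com/mknoir/biotech-digest | scripts/biotech_digest.py | render_digest
-- ===== SOURCE A (Python) =====
-- def render_digest(date_str, items):
--     if not items:
--         return f"# Biotech Daily Digest — {date_str}\n\n_No matching items today._\n"
--
--     lines = [f"# Biotech Daily Digest — {date_str}\n"]
--
--     # Add summary section
--     by_source = {}
--     for it in items:
--         by_source.setdefault(it["source"], []).append(it)
--
--     lines.append(f"**{len(items)} items from {len(by_source)} sources**\n")
--
--     # Add source breakdown
--     source_counts = [(source, len(arr)) for source, arr in sorted(by_source.items())]
--     lines.append("## Summary by Source\n")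
--     for source, count in source_counts:
--         lines.append(f"- {source}: {count} item{'s' if count != 1 else ''}")
--     lines.append("")
--
--     # Add detailed sections
--     for source, arr in sorted(by_source.items()):
--         lines.append(f"\n## {source}\n")
--         for it in arr:
--             title = it["title"] or "(untitled)"
--             link = it["link"] or ""
--             summary = it["summary"] or ""
--             pub = it.get("published", "")
--             lines.append(f"- **[{title}]({link})**  \n  _{pub}_  \n  {summary}\n")
--     return "\n".join(lines).strip() + "\n"
-- ===== SOURCE B (Python) =====
-- def _fmt_item(it):
--     title = it["title"] or "(untitled)"
--     link = it["link"] or ""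
--     summary = it["summary"] or ""
--     pub = it.get("published", "")
--     return f"- **[{title}]({link})**  \n  _{pub}_  \n  {summary}\n"
--
--
-- def render_digest(date_str, items):
--     if not items:
--         return f"# Biotech Daily Digest — {date_str}\n\n_No matching items today._\n"
--     # one stable sort by source (None-safe key), then one linear pass groups adjacent equal sources
--     ordered = sorted(items, key=lambda it: it["source"] or "")
--     groups = []
--     for it in ordered:
--         if groups and groups[-1][0] == it["source"]:
--             groups[-1][1].append(it)
--         else:
--             groups.append((it["source"], [it]))
--     summary_lines = [
--         f"- {src}: {len(arr)} item{'s' if len(arr) != 1 else ''}" for src, arr in groups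
--     ]
--     detail_lines = [
--         line
--         for src, arr in groups
--         for line in [f"\n## {src}\n"] + [_fmt_item(it) for it in arr]
--     ]
--     lines = (
--         [f"# Biotech Daily Digest — {date_str}\n",
--          f"**{len(items)} items from {len(groups)} sources**\n",
--          "## Summary by Source\n"]
--         + summary_lines
--         + [""]
--         + detail_lines
--     )
--     return "\n".join(lines).strip() + "\n"
-- ===== Notes on version B (the rewrite author's own statement) =====
-- stated objective: idiomatic
-- what changed: Replaces the dict-of-lists grouping that is re-sorted via sorted(by_source.items()) and walked with appending for-loops by one stable sort of the items keyed on source (None-safe key) followed by a single linear pass that groups adjacent equal sources, the output lines then being built with comprehensions over those groups.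
import Mathlib
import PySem

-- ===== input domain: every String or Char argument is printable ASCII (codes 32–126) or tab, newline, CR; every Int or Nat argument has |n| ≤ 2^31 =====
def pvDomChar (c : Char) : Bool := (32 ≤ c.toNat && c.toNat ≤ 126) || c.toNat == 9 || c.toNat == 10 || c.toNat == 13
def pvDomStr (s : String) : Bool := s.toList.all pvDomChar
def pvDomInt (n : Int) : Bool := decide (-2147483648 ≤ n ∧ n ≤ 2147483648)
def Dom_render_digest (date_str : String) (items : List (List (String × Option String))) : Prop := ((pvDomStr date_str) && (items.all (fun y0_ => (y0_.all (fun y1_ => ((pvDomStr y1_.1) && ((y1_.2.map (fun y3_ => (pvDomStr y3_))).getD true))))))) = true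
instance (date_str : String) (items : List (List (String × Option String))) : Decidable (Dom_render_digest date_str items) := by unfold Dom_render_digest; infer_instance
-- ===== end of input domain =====

-- B replaces A's dict-of-lists grouping (re-sorted twice and walked with appending loops) by one
-- stable sort of the items on a None-safe source key plus a single adjacent-grouping pass,
-- building the line list with map/flatMap; same output, same asymptotic cost (objective: idiomatic).

-- ===== PORT A =====
-- f-string interpolation of a value that may be Python None: str(None) = "None"
def pvShow (v : Option String) : String :=
  match v with
  | none => "None"
  | some s => s

-- `it["x"] or d` on the result of an association-list lookup ("" and None are falsy);
-- a missing key (Python KeyError) is excluded by Pre_, the getD default there is never claimed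
def pvOrElse (v : Option (Option String)) (d : String) : String :=
  match v.getD none with
  | none => d
  | some s => if s = "" then d else s

-- it.get("published", "") interpolated into the f-string
def pvPub (it : List (String × Option String)) : String :=
  match it.lookup "published" with
  | none => ""
  | some v => pvShow v

-- it["source"] (missing key excluded by Pre_)
def pvSrc (it : List (String × Option String)) : Option String :=
  (it.lookup "source").getD none

-- by_source.setdefault(key, []).append(it) on the association list
def pvUpsert (d : List (Option String × List (List (String × Option String))))
    (key : Option String) (it : List (String × Option String)) :
    List (Option String × List (List (String × Option String))) :=
  match d with
  | [] => [(key, [it])]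
  | (k0, arr) :: rest =>
      if k0 = key then (k0, arr ++ [it]) :: rest else (k0, arr) :: pvUpsert rest key it

-- sorted(by_source.items()): on Pre_'s inputs the keys are distinct strings (or a single key),
-- so Python's tuple comparison only ever compares the source keys; ported as a sort keyed by
-- the source (getD "" is exact on Pre_'s keys)
def render_digest (date_str : String) (items : List (List (String × Option String))) : String :=
  if items = [] then
    "# Biotech Daily Digest — " ++ date_str ++ "\n\n_No matching items today._\n"
  else
    let lines1 := ["# Biotech Daily Digest — " ++ date_str ++ "\n"]
    let by_source := items.foldl (fun d it => pvUpsert d (pvSrc it) it) []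
    let lines2 := lines1 ++ ["**" ++ PySem.Int.toStr (items.length : Int) ++ " items from " ++
      PySem.Int.toStr (by_source.length : Int) ++ " sources**\n"]
    let source_counts := (PySem.List.sorted by_source (fun p => p.1.getD "")).map
      (fun p => (p.1, (p.2.length : Int)))
    let lines3 := lines2 ++ ["## Summary by Source\n"]
    let lines4 := source_counts.foldl (fun ls sc => ls ++
      ["- " ++ pvShow sc.1 ++ ": " ++ PySem.Int.toStr sc.2 ++ " item" ++
        (if sc.2 ≠ 1 then "s" else "")]) lines3
    let lines5 := lines4 ++ [""]
    let lines6 := (PySem.List.sorted by_source (fun p => p.1.getD "")).foldl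
      (fun ls p => p.2.foldl (fun ls2 it => ls2 ++
          ["- **[" ++ pvOrElse (it.lookup "title") "(untitled)" ++ "](" ++
            pvOrElse (it.lookup "link") "" ++ ")**  \n  _" ++ pvPub it ++ "_  \n  " ++
            pvOrElse (it.lookup "summary") "" ++ "\n"])
        (ls ++ ["\n## " ++ pvShow p.1 ++ "\n"])) lines5
    PySem.Str.strip (PySem.Str.join "\n" lines6) ++ "\n"

-- ===== PORT B =====
def pvFmtItem (it : List (String × Option String)) : String :=
  "- **[" ++ pvOrElse (it.lookup "title") "(untitled)" ++ "](" ++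
    pvOrElse (it.lookup "link") "" ++ ")**  \n  _" ++ pvPub it ++ "_  \n  " ++
    pvOrElse (it.lookup "summary") "" ++ "\n"

-- the loop body: append to the last group if it has the same source, else open a new group
def pvAddGroup (gs : List (Option String × List (List (String × Option String))))
    (it : List (String × Option String)) :
    List (Option String × List (List (String × Option String))) :=
  match gs.getLast? with
  | none => [(pvSrc it, [it])]
  | some g => if g.1 = pvSrc it then gs.dropLast ++ [(g.1, g.2 ++ [it])]
              else gs ++ [(pvSrc it, [it])]

-- sort key `it["source"] or ""` (None and "" both map to ""): (pvSrc it).getD ""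
def render_digest_alt (date_str : String) (items : List (List (String × Option String))) : String :=
  if items = [] then
    "# Biotech Daily Digest — " ++ date_str ++ "\n\n_No matching items today._\n"
  else
    let ordered := PySem.List.sorted items (fun it => (pvSrc it).getD "")
    let groups := ordered.foldl pvAddGroup []
    let summary_lines := groups.map (fun g => "- " ++ pvShow g.1 ++ ": " ++
      PySem.Int.toStr (g.2.length : Int) ++ " item" ++
      (if (g.2.length : Int) ≠ 1 then "s" else ""))
    let detail_lines := groups.flatMap
      (fun g => ("\n## " ++ pvShow g.1 ++ "\n") :: g.2.map pvFmtItem)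
    let lines := ["# Biotech Daily Digest — " ++ date_str ++ "\n",
        "**" ++ PySem.Int.toStr (items.length : Int) ++ " items from " ++
          PySem.Int.toStr (groups.length : Int) ++ " sources**\n",
        "## Summary by Source\n"] ++ summary_lines ++ [""] ++ detail_lines
    PySem.Str.strip (PySem.Str.join "\n" lines) ++ "\n"

-- ===== PRECONDITION & SPEC =====
-- Pre_ excludes only inputs on which A raises: items missing one of the keys
-- "source"/"title"/"link"/"summary" (KeyError), and inputs mixing None and string source
-- values (A's sorted(by_source.items()) then compares None with a string: TypeError).
def Pre_render_digest (date_str : String) (items : List (List (String × Option String))) : Prop :=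
  (∀ it ∈ items, (it.lookup "source").isSome ∧ (it.lookup "title").isSome ∧
      (it.lookup "link").isSome ∧ (it.lookup "summary").isSome) ∧
  ((∀ it ∈ items, (pvSrc it).isSome) ∨ (∀ it ∈ items, pvSrc it = none))

instance (date_str : String) (items : List (List (String × Option String))) :
    Decidable (Pre_render_digest date_str items) := by
  unfold Pre_render_digest; infer_instance

def pvWitness_render_digest : String × (List (List (String × Option String))) :=
  ("2024-06-01", [[("source", some "X"), ("title", some "T"), ("link", none), ("summary", some "S")],
                  [("source", some "A"), ("title", some ""), ("link", some "l"), ("summary", none)]])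

def Spec_render_digest (date_str : String) (items : List (List (String × Option String))) (out : String) : Prop := out = render_digest_alt date_str items
instance (date_str : String) (items : List (List (String × Option String))) (out : String) : Decidable (Spec_render_digest date_str items out) := by unfold Spec_render_digest; infer_instance

-- ===== CLAIM (what is proved, stated in full; the proofs are below) =====
def Claim_equal_render_digest : Prop := ∀ (date_str : String) (items : List (List (String × Option String))), Dom_render_digest date_str items → Pre_render_digest date_str items → Spec_render_digest date_str items (render_digest date_str items)


-- ===== LEMMAS AND PROOFS =====

-- L1: filter through one insertion step of the stable insertion sort
theorem pv_filter_insertBy {α κ : Type} [LinearOrder κ] (key : α → κ) (p : α → Bool) (x : α)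
    (ys : List α) (hys : ys.Pairwise (fun a b => key a ≤ key b))
    (hp : ∀ a ∈ ys, p a = true → p x = true → key a = key x) :
    (PySem.List.insertBy (fun a b => decide (key a < key b)) x ys).filter p
      = ys.filter p ++ (if p x then [x] else []) := by
  induction ys with
  | nil => simp [PySem.List.insertBy]; split <;> simp_all
  | cons y ys ih =>
    simp only [PySem.List.insertBy]
    by_cases hlt : key x < key y
    · simp only [hlt, decide_true, if_true]
      by_cases hpx : p x = true
      · have hnil : (y :: ys).filter p = [] := by
          apply List.filter_eq_nil_iff.2
          intro a ha hpa
          have h1 : key a = key x := hp a ha hpa hpx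
          rcases List.mem_cons.1 ha with rfl | ha'
          · exact absurd h1.symm (ne_of_lt hlt)
          · have : key y ≤ key a := (List.pairwise_cons.1 hys).1 a ha'
            exact absurd (h1 ▸ this) (not_le.2 hlt)
        simp [hpx, hnil]
      · simp [List.filter_cons, hpx]
    · simp only [hlt, decide_false]
      have ih' := ih (List.pairwise_cons.1 hys).2 (fun a ha => hp a (List.mem_cons_of_mem _ ha))
      by_cases hpy : p y = true <;> simp [hpy, ih']

-- L2: a stable sort does not change the relative order of elements satisfying a
-- single-key predicate
theorem pv_filter_sorted {α κ : Type} [LinearOrder κ] (key : α → κ) (p : α → Bool)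
    (l : List α) (hp : ∀ a ∈ l, ∀ b ∈ l, p a = true → p b = true → key a = key b) :
    (PySem.List.sorted l key).filter p = l.filter p := by
  induction l using List.reverseRecOn with
  | nil => rfl
  | append_singleton ys x ih =>
    have hs : PySem.List.sorted (ys ++ [x]) key
        = PySem.List.insertBy (fun a b => decide (key a < key b)) x (PySem.List.sorted ys key) := by
      rw [PySem.List.sorted_eq_foldl_insertBy, PySem.List.sorted_eq_foldl_insertBy,
        List.foldl_append]
      rfl
    rw [hs, pv_filter_insertBy key p x _ (PySem.List.sorted_pairwise ys key)
      (fun a ha hpa hpx => hp a (by simp [PySem.List.mem_sorted] at ha; simp [ha])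
        x (by simp) hpa hpx),
      ih (fun a ha b hb => hp a (by simp [ha]) b (by simp [hb])), List.filter_append]
    simp [List.filter_cons]

-- L3: dedup of one appended element
theorem pv_dedup_append {α : Type} [BEq α] [LawfulBEq α] (m : List α) (a : α) :
    PySem.List.dedup (m ++ [a])
      = if a ∈ m then PySem.List.dedup m else PySem.List.dedup m ++ [a] := by
  have : PySem.List.dedup (m ++ [a]) = PySem.Set.add (PySem.List.dedup m) a := by
    simp [PySem.List.dedup, PySem.Set.ofList, List.foldl_append]
  rw [this, PySem.Set.add]
  by_cases hm : a ∈ m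
  · rw [if_pos _, if_pos hm]
    have : a ∈ PySem.List.dedup m := (PySem.List.mem_dedup m a).2 hm
    simpa using this
  · rw [if_neg _, if_neg hm]
    have : a ∉ PySem.List.dedup m := fun h => hm ((PySem.List.mem_dedup m a).1 h)
    simpa using this

-- L4: dedup is a sublist of the original
theorem pv_dedup_sublist {α : Type} [BEq α] [LawfulBEq α] (m : List α) :
    List.Sublist (PySem.List.dedup m) m := by
  induction m using List.reverseRecOn with
  | nil => simp [PySem.List.dedup, PySem.Set.ofList]
  | append_singleton m' a ih =>
    rw [pv_dedup_append]
    split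
    · exact ih.trans (List.sublist_append_left m' [a])
    · exact List.Sublist.append ih (List.Sublist.refl [a])

-- L5: on a key-sorted list of some-values, the first occurrence of a maximal element is
-- the last entry of the dedup
theorem pv_dedup_getLast (m : List (Option String)) (a : Option String)
    (hps : m.Pairwise (fun x y => x.getD "" ≤ y.getD ""))
    (hsome : ∀ x ∈ m, x.isSome) (ha : a ∈ m)
    (hmax : ∀ x ∈ m, x.getD "" ≤ a.getD "") :
    (PySem.List.dedup m).getLast? = some a := by
  induction m using List.reverseRecOn with
  | nil => cases ha
  | append_singleton m' c ih =>
    have hca : c = a := by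
      have h1 : c.getD "" ≤ a.getD "" := hmax c (by simp)
      have h2 : a.getD "" ≤ c.getD "" := by
        rcases List.mem_append.1 ha with h | h
        · exact (List.pairwise_append.1 hps).2.2 a h c (by simp)
        · simp at h; simp [h]
      have heq : a.getD "" = c.getD "" := le_antisymm h2 h1
      rcases Option.isSome_iff_exists.1 (hsome a ha) with ⟨sa, rfl⟩
      rcases Option.isSome_iff_exists.1 (hsome c (by simp)) with ⟨sc, rfl⟩
      simpa using heq.symm
    subst hca
    rw [pv_dedup_append]
    by_cases hm : c ∈ m'
    · rw [if_pos hm]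
      exact ih (List.pairwise_append.1 hps).1
        (fun x hx => hsome x (List.mem_append_left _ hx)) hm
        (fun x hx => hmax x (List.mem_append_left _ hx))
    · rw [if_neg hm]
      exact List.getLast?_concat

-- L6: pvUpsert acting on the grouped form of the dict
theorem pv_upsert_spec (L : List (Option String)) (xs : List (List (String × Option String)))
    (it : List (String × Option String)) (hnd : L.Nodup)
    (hout : pvSrc it ∉ L → xs.filter (fun x => decide (pvSrc x = pvSrc it)) = []) :
    pvUpsert (L.map (fun kk => (kk, xs.filter (fun x => decide (pvSrc x = kk))))) (pvSrc it) it
      = (if pvSrc it ∈ L then L else L ++ [pvSrc it]).map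
          (fun kk => (kk, (xs ++ [it]).filter (fun x => decide (pvSrc x = kk)))) := by
  induction L with
  | nil =>
    simp only [List.map_nil, List.not_mem_nil, if_neg (fun h => h), pvUpsert]
    simp [List.filter_append, hout (by simp)]
  | cons kk L' ih =>
    by_cases hk : kk = pvSrc it
    · subst hk
      rw [if_pos List.mem_cons_self]
      simp only [List.map_cons, pvUpsert]
      rw [if_pos trivial]
      congr 1
      · simp [List.filter_append]
      · apply List.map_congr_left
        intro kk' hk'
        have hne : pvSrc it ≠ kk' := (List.pairwise_cons.1 hnd).1 kk' hk'
        simp [List.filter_append, hne]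
    · have hne : pvSrc it ≠ kk := fun h => hk h.symm
      have hout' : pvSrc it ∉ L' → xs.filter (fun x => decide (pvSrc x = pvSrc it)) = [] :=
        fun h => hout (by simp [h, hne])
      simp only [List.map_cons, pvUpsert, if_neg hk]
      rw [ih (List.pairwise_cons.1 hnd).2 hout']
      by_cases hL : pvSrc it ∈ L'
      · rw [if_pos hL, if_pos (List.mem_cons_of_mem _ hL), List.map_cons]
        congr 1
        simp [List.filter_append, hne]
      · rw [if_neg hL, if_neg (by simp [hne, hL]), List.cons_append, List.map_cons]
        congr 1
        simp [List.filter_append, hne]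

-- L7: A's dict-building loop computes first-occurrence keys with their filtered item lists
theorem pv_foldl_upsert (xs : List (List (String × Option String))) :
    xs.foldl (fun d it => pvUpsert d (pvSrc it) it) []
      = (PySem.List.dedup (xs.map pvSrc)).map
          (fun kk => (kk, xs.filter (fun x => decide (pvSrc x = kk)))) := by
  induction xs using List.reverseRecOn with
  | nil => rfl
  | append_singleton ys it ih =>
    rw [List.foldl_append, List.foldl_cons, List.foldl_nil, ih,
      pv_upsert_spec _ ys it (PySem.List.nodup_dedup _)
        (by
          intro hnm
          apply List.filter_eq_nil_iff.2
          intro x hx hpx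
          exact hnm ((PySem.List.mem_dedup _ _).2
            (List.mem_map.2 ⟨x, hx, by simpa using hpx⟩))),
      List.map_append]
    simp only [List.map_cons, List.map_nil]
    rw [pv_dedup_append]
    by_cases hm : pvSrc it ∈ ys.map pvSrc
    · rw [if_pos ((PySem.List.mem_dedup _ _).2 hm), if_pos hm]
    · rw [if_neg (fun h => hm ((PySem.List.mem_dedup _ _).1 h)), if_neg hm]

-- L8: B's adjacent-grouping pass over a key-sorted list of some-sources computes the same
-- grouped form
theorem pv_foldl_addGroup (xs : List (List (String × Option String)))
    (hps : xs.Pairwise (fun a b => (pvSrc a).getD "" ≤ (pvSrc b).getD ""))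
    (hsome : ∀ x ∈ xs, (pvSrc x).isSome) :
    xs.foldl pvAddGroup []
      = (PySem.List.dedup (xs.map pvSrc)).map
          (fun kk => (kk, xs.filter (fun x => decide (pvSrc x = kk)))) := by
  induction xs using List.reverseRecOn with
  | nil => rfl
  | append_singleton ys x ih =>
    have hys : ys.Pairwise (fun a b => (pvSrc a).getD "" ≤ (pvSrc b).getD "") :=
      (List.pairwise_append.1 hps).1
    have hle : ∀ y ∈ ys, (pvSrc y).getD "" ≤ (pvSrc x).getD "" :=
      fun y hy => (List.pairwise_append.1 hps).2.2 y hy x (by simp)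
    rw [List.foldl_append, List.foldl_cons, List.foldl_nil,
      ih hys (fun y hy => hsome y (by simp [hy]))]
    simp only [List.map_append, List.map_cons, List.map_nil]
    rw [pv_dedup_append]
    by_cases hm : pvSrc x ∈ ys.map pvSrc
    · rw [if_pos hm]
      have hlast : (PySem.List.dedup (ys.map pvSrc)).getLast? = some (pvSrc x) :=
        pv_dedup_getLast _ _ (List.pairwise_map.2 hys)
          (fun kk hkk => by
            rcases List.mem_map.1 hkk with ⟨y, hy, rfl⟩
            exact hsome y (by simp [hy]))
          hm
          (fun kk hkk => by
            rcases List.mem_map.1 hkk with ⟨y, hy, rfl⟩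
            exact hle y hy)
      obtain ⟨K', hK'⟩ := List.getLast?_eq_some_iff.1 hlast
      rw [hK']
      have hnodup : (K' ++ [pvSrc x]).Nodup := hK' ▸ PySem.List.nodup_dedup _
      have hnotin : pvSrc x ∉ K' := by
        intro h
        exact (List.disjoint_of_nodup_append hnodup) h (by simp)
      simp only [pvAddGroup, List.getLast?_map, List.getLast?_concat, Option.map_some]
      rw [if_pos trivial]
      rw [List.map_append, List.map_append, List.map_cons, List.map_nil,
        List.dropLast_concat]
      congr 1
      · apply List.map_congr_left
        intro kk hkk
        have hne : ¬ pvSrc x = kk := fun h => hnotin (h ▸ hkk)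
        simp [List.filter_append, hne]
      · simp [List.filter_append]
    · rw [if_neg hm]
      by_cases hK0 : PySem.List.dedup (ys.map pvSrc) = []
      · have hys0 : ys.map pvSrc = [] := by
          rcases hy : ys.map pvSrc with _ | ⟨a, t⟩
          · rfl
          · exfalso
            have : a ∈ PySem.List.dedup (ys.map pvSrc) :=
              (PySem.List.mem_dedup _ _).2 (by simp [hy])
            rw [hK0] at this
            cases this
        have : ys = [] := List.map_eq_nil_iff.1 hys0
        subst this
        simp [pvAddGroup, List.filter_cons]
      · obtain ⟨kk₀, hk₀⟩ := Option.isSome_iff_exists.1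
          (List.getLast?_isSome.2 hK0)
        have hkk₀ : kk₀ ∈ ys.map pvSrc :=
          (PySem.List.mem_dedup _ _).1 (List.mem_of_getLast? hk₀)
        have hne : ¬ kk₀ = pvSrc x := fun h => hm (h ▸ hkk₀)
        simp only [pvAddGroup, List.getLast?_map, hk₀, Option.map_some]
        rw [if_neg (by simpa using hne)]
        rw [List.map_append, List.map_cons, List.map_nil]
        congr 1
        · apply List.map_congr_left
          intro kk hkk
          have hkk' : kk ∈ ys.map pvSrc := (PySem.List.mem_dedup _ _).1 hkk
          have hne' : ¬ pvSrc x = kk := fun h => hm (h ▸ hkk')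
          simp [List.filter_append, hne']
        · have hnilf : ys.filter (fun y => decide (pvSrc y = pvSrc x)) = [] := by
            apply List.filter_eq_nil_iff.2
            intro y hy hpy
            exact hm (List.mem_map.2 ⟨y, hy, by simpa using hpy⟩)
          simp [List.filter_append, hnilf]

-- L9: dict grouping + key sort (A) equals stable sort + adjacent grouping (B)
theorem pv_groups_eq (items : List (List (String × Option String)))
    (H : ∀ it ∈ items, (pvSrc it).isSome) :
    PySem.List.sorted (items.foldl (fun d it => pvUpsert d (pvSrc it) it) [])
        (fun p => p.1.getD "")
      = (PySem.List.sorted items (fun it => (pvSrc it).getD "")).foldl pvAddGroup [] := by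
  have hxs_pair : (PySem.List.sorted items (fun it => (pvSrc it).getD "")).Pairwise
      (fun a b => (pvSrc a).getD "" ≤ (pvSrc b).getD "") :=
    PySem.List.sorted_pairwise items (fun it => (pvSrc it).getD "")
  have hxs_some : ∀ x ∈ PySem.List.sorted items (fun it => (pvSrc it).getD ""),
      (pvSrc x).isSome :=
    fun x hx => H x ((PySem.List.mem_sorted items _ false x).1 hx)
  rw [pv_foldl_upsert, pv_foldl_addGroup _ hxs_pair hxs_some]
  set xs := PySem.List.sorted items (fun it => (pvSrc it).getD "") with hxs
  have hmemxs : ∀ a, a ∈ xs ↔ a ∈ items :=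
    fun a => PySem.List.mem_sorted items _ false a
  have hSD_le : (PySem.List.dedup (xs.map pvSrc)).Pairwise
      (fun a b => a.getD "" ≤ b.getD "") :=
    List.Pairwise.sublist (pv_dedup_sublist _) (List.pairwise_map.2 hxs_pair)
  have hSD_some : ∀ kk ∈ PySem.List.dedup (xs.map pvSrc), kk.isSome := by
    intro kk hkk
    rcases List.mem_map.1 ((PySem.List.mem_dedup _ _).1 hkk) with ⟨y, hy, rfl⟩
    exact hxs_some y hy
  have hSD_lt : (PySem.List.dedup (xs.map pvSrc)).Pairwise
      (fun a b => a.getD "" < b.getD "") := by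
    have hand := List.Pairwise.and hSD_le (PySem.List.nodup_dedup (xs.map pvSrc))
    refine hand.imp_of_mem ?_
    intro a b ha hb hab
    refine lt_of_le_of_ne hab.1 ?_
    intro heq
    rcases Option.isSome_iff_exists.1 (hSD_some a ha) with ⟨sa, rfl⟩
    rcases Option.isSome_iff_exists.1 (hSD_some b hb) with ⟨sb, rfl⟩
    exact hab.2 (by simpa using heq)
  have hperm : (PySem.List.dedup (xs.map pvSrc)).Perm
      (PySem.List.dedup (items.map pvSrc)) := by
    refine (List.perm_ext_iff_of_nodup (PySem.List.nodup_dedup _)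
      (PySem.List.nodup_dedup _)).2 ?_
    intro a
    rw [PySem.List.mem_dedup, PySem.List.mem_dedup]
    constructor
    · intro h
      rcases List.mem_map.1 h with ⟨y, hy, rfl⟩
      exact List.mem_map.2 ⟨y, (hmemxs y).1 hy, rfl⟩
    · intro h
      rcases List.mem_map.1 h with ⟨y, hy, rfl⟩
      exact List.mem_map.2 ⟨y, (hmemxs y).2 hy, rfl⟩
  rw [PySem.List.sorted_eq_of_perm_of_pairwise_lt _
      ((PySem.List.dedup (xs.map pvSrc)).map
        (fun kk => (kk, items.filter (fun x => decide (pvSrc x = kk)))))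
      (fun p => p.1.getD "")
      (hperm.map _) (List.pairwise_map.2 hSD_lt)]
  apply List.map_congr_left
  intro kk hkk
  congr 1
  exact (pv_filter_sorted (fun it => (pvSrc it).getD "")
    (fun x => decide (pvSrc x = kk)) items
    (fun a _ b _ hpa hpb => by
      have ha : pvSrc a = kk := of_decide_eq_true hpa
      have hb : pvSrc b = kk := of_decide_eq_true hpb
      simp only []
      show (pvSrc a).getD "" = (pvSrc b).getD ""
      rw [ha, hb])).symm

-- rendering: once the grouped pair lists agree, both programs emit the same lines
theorem pv_render_congr (date_str : String) (items : List (List (String × Option String)))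
    (hne : ¬ items = [])
    (hG : PySem.List.sorted (items.foldl (fun d it => pvUpsert d (pvSrc it) it) [])
            (fun p => p.1.getD "")
          = (PySem.List.sorted items (fun it => (pvSrc it).getD "")).foldl pvAddGroup []) :
    render_digest date_str items = render_digest_alt date_str items := by
  have hlen : (items.foldl (fun d it => pvUpsert d (pvSrc it) it) []).length
      = ((PySem.List.sorted items (fun it => (pvSrc it).getD "")).foldl pvAddGroup []).length := by
    rw [← hG, PySem.List.length_sorted]
  simp only [render_digest, render_digest_alt, if_neg hne]
  rw [hG, hlen]
  simp only [PySem.List.foldl_append_singleton_eq_map, List.append_assoc,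
    PySem.List.foldl_append_eq_flatMap, List.map_map]
  rfl

-- L10: dedup of a nonempty constant list is the singleton
theorem pv_dedup_const (m : List (Option String)) (a : Option String) (hne : m ≠ [])
    (h : ∀ x ∈ m, x = a) : PySem.List.dedup m = [a] := by
  induction m using List.reverseRecOn with
  | nil => exact absurd rfl hne
  | append_singleton m' c ih =>
    have hc : c = a := h c (by simp)
    subst hc
    rw [pv_dedup_append]
    rcases m' with _ | ⟨y, t⟩
    · simp [PySem.List.dedup, PySem.Set.ofList]
    · have hy : y = c := h y (by simp)
      rw [if_pos (by simp [hy])]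
      exact ih (by simp) (fun x hx => h x (by simp [List.mem_cons] at hx ⊢; tauto))

-- L11: B's grouping pass on an all-None-source list makes a single group
theorem pv_foldl_addGroup_none (xs : List (List (String × Option String))) (hne : xs ≠ [])
    (h : ∀ x ∈ xs, pvSrc x = none) :
    xs.foldl pvAddGroup [] = [(none, xs)] := by
  induction xs using List.reverseRecOn with
  | nil => exact absurd rfl hne
  | append_singleton ys x ih =>
    have hx : pvSrc x = none := h x (by simp)
    rcases ys with _ | ⟨y, t⟩
    · simp [pvAddGroup, hx]
    · rw [List.foldl_append, List.foldl_cons, List.foldl_nil,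
        ih (by simp) (fun z hz => h z (by simp [List.mem_cons] at hz ⊢; tauto))]
      simp [pvAddGroup, hx]

-- all-None sources: both sides group everything into the single key None
theorem pv_groups_eq_none (items : List (List (String × Option String))) (hne : items ≠ [])
    (H : ∀ it ∈ items, pvSrc it = none) :
    PySem.List.sorted (items.foldl (fun d it => pvUpsert d (pvSrc it) it) [])
        (fun p => p.1.getD "")
      = (PySem.List.sorted items (fun it => (pvSrc it).getD "")).foldl pvAddGroup [] := by
  have hsid : PySem.List.sorted items (fun it => (pvSrc it).getD "") = items :=
    PySem.List.sorted_eq_self_of_pairwise _ _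
      (List.pairwise_of_forall_mem_list (fun a ha b hb => by rw [H a ha, H b hb]))
  have hfilt : items.filter (fun x => decide (pvSrc x = none)) = items :=
    List.filter_eq_self.2 (fun x hx => decide_eq_true (H x hx))
  rw [hsid, pv_foldl_addGroup_none items hne H, pv_foldl_upsert,
    pv_dedup_const (items.map pvSrc) none (by simpa using hne)
      (by intro x hx; rcases List.mem_map.1 hx with ⟨y, hy, rfl⟩; exact H y hy),
    List.map_cons, List.map_nil, hfilt,
    PySem.List.sorted_eq_self_of_pairwise _ _ (List.pairwise_singleton _ _)]

-- ===== VERDICT (by name: the statement is the Claim_ definition above) =====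
theorem render_digest_spec : Claim_equal_render_digest := by
  intro date_str items _hdom hpre
  show render_digest date_str items = render_digest_alt date_str items
  by_cases hne : items = []
  · subst hne; rfl
  · rcases hpre with ⟨_hkeys, hsome | hnone⟩
    · exact pv_render_congr date_str items hne (pv_groups_eq items hsome)
    · exact pv_render_congr date_str items hne (pv_groups_eq_none items hne hnone)
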